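-- pv_equiv track=rewrite | github.com/michitaro/leaflet-tools | tilize.py | max_level
-- ===== SOURCE A (Python) =====
-- TILESIZE = 256
--
-- def max_level(d):
--     d -= 1
--     d //= TILESIZE
--     z = 0
--     while d != 0:
--         d //= 2
--         z += 1
--     return z
-- ===== SOURCE B (Python) =====
-- TILESIZE = 256
--
-- def max_level(d):
--     return ((d - 1) // TILESIZE).bit_length()
-- ===== Notes on version B (the rewrite author's own statement) =====
-- stated objective: idiomatic
-- what changed: Replaces the iterative halving-count loop with the closed-form int.bit_length() of (d-1)//256, eliminating the loop and counter entirely.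
-- outside the precondition, e.g. on max_level(0): A does not finish within the time limit, B returns 1; on max_level(-1): A does not finish within the time limit, B returns 1
import Mathlib
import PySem

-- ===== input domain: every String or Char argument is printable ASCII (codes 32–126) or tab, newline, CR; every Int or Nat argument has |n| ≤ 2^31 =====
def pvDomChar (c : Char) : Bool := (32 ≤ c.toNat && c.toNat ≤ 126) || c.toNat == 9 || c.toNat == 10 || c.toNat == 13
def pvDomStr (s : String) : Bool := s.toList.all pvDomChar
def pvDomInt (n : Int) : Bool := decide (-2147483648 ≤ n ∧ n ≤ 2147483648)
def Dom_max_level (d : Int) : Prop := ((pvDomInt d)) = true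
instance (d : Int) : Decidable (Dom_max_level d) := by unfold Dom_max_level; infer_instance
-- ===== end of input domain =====

-- B replaces A's halving-count loop with the closed-form bit length of (d-1)//256 (idiomatic; same values).
-- ===== PORT A =====
-- the while loop of A; fuel is a totality guard only (fuel = d.natAbs + 1 always suffices on Pre_)
def maxLevelLoop (fuel : Nat) (d z : Int) : Int :=
  match fuel with
  | 0 => z
  | f + 1 => if d ≠ 0 then maxLevelLoop f (PySem.Int.floordiv d 2) (z + 1) else z

def max_level (d : Int) : Int :=
  let d1 := PySem.Int.floordiv (d - 1) 256
  maxLevelLoop (d1.natAbs + 1) d1 0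

-- ===== PORT B =====
def max_level_alt (d : Int) : Int :=
  (PySem.Int.bitLength (PySem.Int.floordiv (d - 1) 256) : Int)

-- ===== PRECONDITION & SPEC =====
-- Pre_ excludes d ≤ 0, on which A's while loop never terminates ((d-1)//256 = -1 stays -1 under //2).
def Pre_max_level (d : Int) : Prop := 1 ≤ d
instance (d : Int) : Decidable (Pre_max_level d) := by unfold Pre_max_level; infer_instance
def pvWitness_max_level : Int := 513

def Spec_max_level (d : Int) (out : Int) : Prop := out = max_level_alt d
instance (d : Int) (out : Int) : Decidable (Spec_max_level d out) := by unfold Spec_max_level; infer_instance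

-- ===== CLAIM (what is proved, stated in full; the proofs are below) =====
def Claim_equal_max_level : Prop := ∀ (d : Int), Dom_max_level d → Pre_max_level d → Spec_max_level d (max_level d)

-- ===== LEMMAS AND PROOFS =====
theorem maxLevelLoop_eq (fuel : Nat) : ∀ (n z : Int), 0 ≤ n → n.natAbs < fuel →
    maxLevelLoop fuel n z = z + (PySem.Int.bitLength n : Int) := by
  induction fuel with
  | zero => intro n z _ h; omega
  | succ f ih =>
    intro n z hn hlt
    by_cases h0 : n = 0
    · simp [maxLevelLoop, h0, PySem.Int.bitLength_zero]
    · have hpos : 0 < n := lt_of_le_of_ne hn (Ne.symm h0)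
      have hdiv : PySem.Int.floordiv n 2 = ((n.natAbs / 2 : Nat) : Int) := by
        rcases Int.eq_ofNat_of_zero_le hn with ⟨m, rfl⟩
        simp
      have hrec := ih (PySem.Int.floordiv n 2) (z + 1)
        (by rw [hdiv]; exact Int.natCast_nonneg _)
        (by
          have h1 : n.natAbs ≠ 0 := by simpa using h0
          rw [hdiv, Int.natAbs_natCast]; omega)
      rw [maxLevelLoop, if_pos h0, hrec, PySem.Int.bitLength_of_pos hpos]
      push_cast
      ring

-- ===== VERDICT (by name: the statement is the Claim_ definition above) =====
theorem max_level_spec : Claim_equal_max_level := by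
  intro d _ hpre
  have hd : 1 ≤ d := hpre
  unfold Spec_max_level max_level max_level_alt
  have hq : 0 ≤ PySem.Int.floordiv (d - 1) 256 := by
    rw [PySem.Int.le_floordiv_iff_mul_le (by omega)]; omega
  rw [maxLevelLoop_eq _ _ _ hq (by omega)]
  simp
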